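-- pv_equiv track=rewrite | github.com/CH-Kim92/IRproject | group11/main.py | find_action
-- ===== SOURCE A (Python) =====
-- def find_action(actions, index):
--     count = 0
--     point_index = []
--     for r in range(len(actions)):
--         for c in range(len(actions[r])):
--             for d in range(len(actions[r][c])):
--                 if count == index:
--                     point_index.append(r)
--                     point_index.append(c)
--                     point_index.append(d)
--                     return point_index
--                 else:
--                     count += 1
--     return point_index
-- ===== SOURCE B (Python) =====
-- def find_action(actions, index):
--     rem = index
--     for r, row in enumerate(actions):
--         for c, cell in enumerate(row):
--             if 0 <= rem < len(cell):
--                 return [r, c, rem]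
--             rem -= len(cell)
--     return []
-- ===== Notes on version B (the rewrite author's own statement) =====
-- stated objective: alternative
-- what changed: B locates the flat index by subtracting whole-cell lengths (one bounds check per (r,c) block) instead of A's element-by-element counter; fewer iterations when inner lists are long, measured about the same on the generated inputs.
import Mathlib
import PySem

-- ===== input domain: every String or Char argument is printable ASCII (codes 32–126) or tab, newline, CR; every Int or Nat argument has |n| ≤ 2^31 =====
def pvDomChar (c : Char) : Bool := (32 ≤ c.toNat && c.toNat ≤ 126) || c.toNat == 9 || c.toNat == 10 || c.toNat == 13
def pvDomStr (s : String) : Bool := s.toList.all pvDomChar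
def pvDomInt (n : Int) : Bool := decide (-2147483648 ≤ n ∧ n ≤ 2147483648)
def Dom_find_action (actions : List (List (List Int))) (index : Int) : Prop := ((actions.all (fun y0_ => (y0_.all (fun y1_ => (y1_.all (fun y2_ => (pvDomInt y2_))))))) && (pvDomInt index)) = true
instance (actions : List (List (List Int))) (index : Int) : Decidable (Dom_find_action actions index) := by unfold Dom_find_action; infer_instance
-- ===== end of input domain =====

-- B locates the flat index by subtracting whole-cell lengths (one bounds check per (r,c) block)
-- instead of A's element-by-element counting; it skips the innermost loop entirely.

-- ===== PORT A =====
-- innermost loop: for d in range(len(cell)): if count == index: return [r,c,d] else count += 1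
def aLoopD (r c : Int) (ds : List Int) (d count index : Int) : Sum (List Int) Int :=
  match ds with
  | [] => .inr count
  | _ :: rest => if count = index then .inl [r, c, d] else aLoopD r c rest (d + 1) (count + 1) index

-- middle loop over c
def aLoopC (r : Int) (cells : List (List Int)) (c count index : Int) : Sum (List Int) Int :=
  match cells with
  | [] => .inr count
  | cell :: rest =>
    match aLoopD r c cell 0 count index with
    | .inl found => .inl found
    | .inr count' => aLoopC r rest (c + 1) count' index

-- outer loop over r
def aLoopR (rows : List (List (List Int))) (r count index : Int) : Sum (List Int) Int :=
  match rows with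
  | [] => .inr count
  | row :: rest =>
    match aLoopC r row 0 count index with
    | .inl found => .inl found
    | .inr count' => aLoopR rest (r + 1) count' index

def find_action (actions : List (List (List Int))) (index : Int) : List Int :=
  match aLoopR actions 0 0 index with
  | .inl found => found
  | .inr _ => []          -- point_index is still []

-- ===== PORT B =====
-- inner loop of B: for c, cell in enumerate(row): if 0 <= rem < len(cell): return [r,c,rem]; rem -= len(cell)
def bLoopC (r : Int) (cells : List (List Int)) (c rem : Int) : Sum (List Int) Int :=
  match cells with
  | [] => .inr rem
  | cell :: rest =>
    if 0 ≤ rem ∧ rem < (cell.length : Int) then .inl [r, c, rem]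
    else bLoopC r rest (c + 1) (rem - cell.length)

def bLoopR (rows : List (List (List Int))) (r rem : Int) : Sum (List Int) Int :=
  match rows with
  | [] => .inr rem
  | row :: rest =>
    match bLoopC r row 0 rem with
    | .inl found => .inl found
    | .inr rem' => bLoopR rest (r + 1) rem'

def find_action_alt (actions : List (List (List Int))) (index : Int) : List Int :=
  match bLoopR actions 0 index with
  | .inl found => found
  | .inr _ => []

-- ===== PRECONDITION & SPEC =====
def Spec_find_action (actions : List (List (List Int))) (index : Int) (out : List Int) : Prop := out = find_action_alt actions index
instance (actions : List (List (List Int))) (index : Int) (out : List Int) : Decidable (Spec_find_action actions index out) := by unfold Spec_find_action; infer_instance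

-- ===== CLAIM (what is proved, stated in full; the proofs are below) =====
def Claim_equal_find_action : Prop := ∀ (actions : List (List (List Int))) (index : Int), Dom_find_action actions index → Spec_find_action actions index (find_action actions index)

-- ===== LEMMAS AND PROOFS =====

-- A's innermost scan, in closed form: hit at offset index - count if it is inside the cell.
lemma aLoopD_eq (r c : Int) (ds : List Int) (d count index : Int) :
    aLoopD r c ds d count index =
      if 0 ≤ index - count ∧ index - count < (ds.length : Int)
      then .inl [r, c, d + (index - count)]
      else .inr (count + ds.length) := by
  induction ds generalizing d count with
  | nil => simp [aLoopD]
  | cons x rest ih =>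
    simp only [aLoopD, ih, List.length_cons]
    by_cases h : count = index
    · subst h
      rw [if_pos (by push_cast; omega)]
      simp
    · rw [if_neg h]
      split_ifs with h1 h2 h2
      · have : d + 1 + (index - (count + 1)) = d + (index - count) := by ring
        rw [this]
      · exfalso; push_cast at *; omega
      · exfalso; push_cast at *; omega
      · have : count + 1 + (rest.length : Int) = count + ((rest.length : Int) + 1) := by ring
        rw [this]; push_cast; ring_nf

-- A's middle loop agrees with B's middle loop under rem = index - count.
lemma loopC_eq (r : Int) (cells : List (List Int)) (c count index : Int) :
    aLoopC r cells c count index =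
      match bLoopC r cells c (index - count) with
      | .inl found => .inl found
      | .inr rem' => .inr (index - rem') := by
  induction cells generalizing c count with
  | nil => simp [aLoopC, bLoopC]
  | cons cell rest ih =>
    simp only [aLoopC, bLoopC, aLoopD_eq]
    split_ifs with h
    · simp
    · simpa [sub_sub] using ih (c + 1) (count + (cell.length : Int))

-- Outer loops agree under rem = index - count.
lemma loopR_eq (rows : List (List (List Int))) (r count index : Int) :
    aLoopR rows r count index =
      match bLoopR rows r (index - count) with
      | .inl found => .inl found
      | .inr rem' => .inr (index - rem') := by
  induction rows generalizing r count with
  | nil => simp [aLoopR, bLoopR]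
  | cons row rest ih =>
    simp only [aLoopR, bLoopR, loopC_eq]
    cases hb : bLoopC r row 0 (index - count) with
    | inl found => simp
    | inr rem' =>
      simp only []
      rw [ih]
      have : index - (index - rem') = rem' := by ring
      rw [this]

-- ===== VERDICT (by name: the statement is the Claim_ definition above) =====
theorem find_action_spec : Claim_equal_find_action := by
  intro actions index _
  unfold Spec_find_action find_action find_action_alt
  rw [loopR_eq]
  have : index - 0 = index := by ring
  rw [this]
  cases bLoopR actions 0 index <;> simp
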